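-- pv_equiv track=rewrite | github.com/Dylan0708/Hopstack | modules/format_methods.py | sql_sanitize
-- ===== SOURCE A (Python) =====
-- def sql_sanitize(query):
--     query_elem = []
--
--     for i in query:
--         query_elem.append(i)
--
--         if i == '\\':
--             query_elem.append('\\')
--         elif i == "'":
--             query_elem.append("'")
--
--     sanit_str = ''.join(query_elem)
--
--     return sanit_str
-- ===== SOURCE B (Python) =====
-- def sql_sanitize(query):
--     return query.replace('\\', '\\\\').replace("'", "''")
-- ===== Notes on version B (the rewrite author's own statement) =====
-- stated objective: idiomatic
-- what changed: Replaces the character-by-character list-building loop with two whole-string str.replace passes (backslash doubling, then quote doubling), which are independent because neither doubled output contains the other pass's target character.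
import Mathlib
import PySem

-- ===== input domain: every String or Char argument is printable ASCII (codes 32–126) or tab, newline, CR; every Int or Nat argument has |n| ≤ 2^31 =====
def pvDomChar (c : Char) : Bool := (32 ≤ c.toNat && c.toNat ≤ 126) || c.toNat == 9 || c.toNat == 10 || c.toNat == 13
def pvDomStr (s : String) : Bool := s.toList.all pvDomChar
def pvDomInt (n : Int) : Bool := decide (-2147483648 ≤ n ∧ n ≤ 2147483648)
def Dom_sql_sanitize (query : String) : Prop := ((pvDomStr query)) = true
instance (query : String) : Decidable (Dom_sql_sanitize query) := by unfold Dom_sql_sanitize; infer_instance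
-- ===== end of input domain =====

-- B replaces A's character-by-character list-building loop with two whole-string replace passes.

-- ===== PORT A =====
-- for i in query: append i; if i == '\\': append '\\' elif i == "'": append "'"
def sql_sanitize (query : String) : String :=
  let query_elem : List Char :=
    query.toList.foldl
      (fun acc i =>
        let acc := acc ++ [i]
        if i = '\\' then acc ++ ['\\']
        else if i = '\'' then acc ++ ['\'']
        else acc) []
  String.ofList query_elem

-- ===== PORT B =====
def sql_sanitize_alt (query : String) : String :=
  PySem.Str.replace (PySem.Str.replace query "\\" "\\\\") "'" "''"

-- ===== PRECONDITION & SPEC =====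
def Spec_sql_sanitize (query : String) (out : String) : Prop := out = sql_sanitize_alt query
instance (query : String) (out : String) : Decidable (Spec_sql_sanitize query out) := by unfold Spec_sql_sanitize; infer_instance

-- ===== CLAIM (what is proved, stated in full; the proofs are below) =====
def Claim_equal_sql_sanitize : Prop := ∀ (query : String), Dom_sql_sanitize query → Spec_sql_sanitize query (sql_sanitize query)

-- ===== LEMMAS AND PROOFS =====

-- replace with a single-character pattern is a per-character flatMap
theorem replace_go_singleton (c : Char) (new : List Char) :
    ∀ (l acc : List Char),
      PySem.Chars.replace.go [c] new l.length l acc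
        = acc.reverse ++ l.flatMap (fun x => if x = c then new else [x]) := by
  intro l
  induction l with
  | nil => intro acc; simp [PySem.Chars.replace.go]
  | cons h t ih =>
      intro acc
      show PySem.Chars.replace.go [c] new (t.length + 1) (h :: t) acc = _
      rw [PySem.Chars.replace.go]
      by_cases hc : h = c
      · simp [hc, List.isPrefixOf, ih]
      · have : [c].isPrefixOf (h :: t) = false := by
          simp [List.isPrefixOf]
          exact fun h' => hc h'.symm
        simp [this, ih, hc]

theorem replace_singleton (s : List Char) (c : Char) (new : List Char) :
    PySem.Chars.replace s [c] new = s.flatMap (fun x => if x = c then new else [x]) := by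
  rw [PySem.Chars.replace]
  simp [replace_go_singleton]

theorem sql_sanitize_spec : Claim_equal_sql_sanitize := by
  intro query _
  unfold Spec_sql_sanitize sql_sanitize sql_sanitize_alt
  simp only [PySem.Str.replace, String.toList_ofList]
  have e1 : "\\".toList = ['\\'] := rfl
  have e2 : "'".toList = ['\''] := rfl
  rw [e1, e2, replace_singleton, replace_singleton]
  congr 1
  have hfold :
      query.toList.foldl
        (fun acc i =>
          let acc := acc ++ [i]
          if i = '\\' then acc ++ ['\\']
          else if i = '\'' then acc ++ ['\'']
          else acc) []
        = query.toList.flatMap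
            (fun i => if i = '\\' then ['\\', '\\']
                      else if i = '\'' then ['\'', '\''] else [i]) := by
    have := PySem.List.foldl_append_eq_flatMap
      (l := query.toList) (acc := ([] : List Char))
      (g := fun i => if i = '\\' then ['\\', '\\']
                     else if i = '\'' then ['\'', '\''] else [i])
    simp only [List.nil_append] at this
    rw [← this]
    apply PySem.List.foldl_congr_mem _ _ _ _
    intro acc i _
    by_cases h1 : i = '\\' <;> by_cases h2 : i = '\'' <;> simp [h1, h2]
  rw [hfold, List.flatMap_assoc]
  apply List.flatMap_congr
  · intro i _
    by_cases h1 : i = '\\' <;> by_cases h2 : i = '\'' <;> simp [h1, h2]
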